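-- pv_equiv track=rewrite | github.com/IntelLabs/aqtnd | mera_demo/disordered_mera.py | dist_distance
-- ===== SOURCE A (Python) =====
-- from copy import copy
--
-- def dist_distance(idxs1, idxs2):
--     dist = 0
--     i2 = copy(idxs2)
--     for idx in idxs1:
--         if idx in i2:
--             i2.pop(i2.index(idx))
--         else:
--             dist += 1
--
--     return dist
-- ===== SOURCE B (Python) =====
-- from copy import copy
--
-- def dist_distance(idxs1, idxs2):
--     c1 = {}
--     for v in idxs1:
--         c1[v] = c1.get(v, 0) + 1
--     c2 = {}
--     for v in idxs2:
--         c2[v] = c2.get(v, 0) + 1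
--     return sum(max(0, n - c2.get(v, 0)) for v, n in c1.items())
-- ===== Notes on version B (the rewrite author's own statement) =====
-- stated objective: faster
-- what changed: Replaces the element-by-element probe-and-remove loop over a shrinking copy of idxs2 with two frequency tables built in one pass each, returning the sum of max(0, count1(v)-count2(v)) over distinct values.
import Mathlib
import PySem

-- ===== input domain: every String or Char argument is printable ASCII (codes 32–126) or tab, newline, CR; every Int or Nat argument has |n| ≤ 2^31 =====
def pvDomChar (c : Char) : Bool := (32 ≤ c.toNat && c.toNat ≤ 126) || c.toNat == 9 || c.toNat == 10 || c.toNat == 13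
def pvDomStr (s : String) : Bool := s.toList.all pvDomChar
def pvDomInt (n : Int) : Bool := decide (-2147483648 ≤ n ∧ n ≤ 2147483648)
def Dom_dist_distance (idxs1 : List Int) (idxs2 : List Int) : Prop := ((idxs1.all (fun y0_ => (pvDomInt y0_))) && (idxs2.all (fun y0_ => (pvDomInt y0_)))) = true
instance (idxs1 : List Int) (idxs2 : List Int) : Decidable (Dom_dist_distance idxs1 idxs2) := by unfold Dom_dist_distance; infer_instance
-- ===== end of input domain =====

-- B replaces A's probe-and-remove loop over a shrinking copy of idxs2 with two frequency
-- tables and one aggregate pass over distinct values (neither version mutates its arguments).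

-- ===== PORT A =====
-- for idx in idxs1: if idx in i2: i2.pop(i2.index(idx)) else dist += 1
-- 'i2.pop(i2.index(idx))' removes the FIRST occurrence of idx, which is exactly List.erase
-- (exact here because '==' on Int is equality); the branch is guarded by 'idx in i2'.
def distLoop : List Int → List Int → Int → Int
  | [], _, dist => dist
  | idx :: rest, i2, dist =>
    if idx ∈ i2 then distLoop rest (i2.erase idx) dist
    else distLoop rest i2 (dist + 1)

def dist_distance (idxs1 : List Int) (idxs2 : List Int) : Int :=
  distLoop idxs1 idxs2 0    -- i2 = copy(idxs2), dist = 0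

-- ===== PORT B =====
-- c[v] = c.get(v, 0) + 1 loops, then sum of max(0, n - c2.get(v, 0)) over c1.items()
def dist_distance_alt (idxs1 : List Int) (idxs2 : List Int) : Int :=
  let c1 := idxs1.foldl (fun d v => d.insert v (d.getD v 0 + 1)) PySem.Dict.empty
  let c2 := idxs2.foldl (fun d v => d.insert v (d.getD v 0 + 1)) PySem.Dict.empty
  (c1.items.map (fun p => max 0 (p.2 - c2.getD p.1 0))).sum

-- ===== PRECONDITION & SPEC =====
def Spec_dist_distance (idxs1 : List Int) (idxs2 : List Int) (out : Int) : Prop := out = dist_distance_alt idxs1 idxs2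
instance (idxs1 : List Int) (idxs2 : List Int) (out : Int) : Decidable (Spec_dist_distance idxs1 idxs2 out) := by unfold Spec_dist_distance; infer_instance

-- ===== CLAIM (what is proved, stated in full; the proofs are below) =====
def Claim_equal_dist_distance : Prop := ∀ (idxs1 : List Int) (idxs2 : List Int), Dom_dist_distance idxs1 idxs2 → Spec_dist_distance idxs1 idxs2 (dist_distance idxs1 idxs2)

-- ===== LEMMAS AND PROOFS =====

-- Taking one x out of both multisets when x occurs in t.
theorem msub_cons_mem {x : Int} {s t : Multiset Int} (h : x ∈ t) :
    (x ::ₘ s) - t = s - t.erase x := by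
  have h1 : 1 ≤ t.count x := Multiset.one_le_count_iff_mem.mpr h
  ext a
  by_cases hax : a = x
  · subst hax
    simp only [Multiset.count_sub, Multiset.count_cons_self, Multiset.count_erase_self]
    omega
  · simp only [Multiset.count_sub, Multiset.count_cons_of_ne hax,
      Multiset.count_erase_of_ne hax]

-- An x absent from t survives subtraction.
theorem msub_cons_not_mem {x : Int} {s t : Multiset Int} (h : x ∉ t) :
    (x ::ₘ s) - t = x ::ₘ (s - t) := by
  have h0 : t.count x = 0 := Multiset.count_eq_zero.mpr h
  ext a
  by_cases hax : a = x
  · subst hax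
    simp only [Multiset.count_sub, Multiset.count_cons_self]
    omega
  · simp only [Multiset.count_sub, Multiset.count_cons_of_ne hax]

-- A's loop computes the size of the multiset difference.
theorem distLoop_eq_card_sub :
    ∀ (l t : List Int) (d : Int),
      distLoop l t d = d + (((l : Multiset Int) - (t : Multiset Int)).card : Int) := by
  intro l
  induction l with
  | nil => intro t d; simp [distLoop]
  | cons x rest ih =>
    intro t d
    by_cases hx : x ∈ t
    · rw [show distLoop (x :: rest) t d = distLoop rest (t.erase x) d from by
        simp [distLoop, hx], ih]
      have : ((x :: rest : List Int) : Multiset Int) - (t : Multiset Int)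
          = ((rest : List Int) : Multiset Int) - ((t.erase x : List Int) : Multiset Int) := by
        rw [← Multiset.cons_coe, msub_cons_mem (Multiset.mem_coe.mpr hx), Multiset.coe_erase]
      rw [this]
    · rw [show distLoop (x :: rest) t d = distLoop rest t (d + 1) from by
        simp [distLoop, hx], ih]
      have : ((x :: rest : List Int) : Multiset Int) - (t : Multiset Int)
          = x ::ₘ (((rest : List Int) : Multiset Int) - (t : Multiset Int)) := by
        rw [← Multiset.cons_coe, msub_cons_not_mem (fun hc => hx (Multiset.mem_coe.mp hc))]
      rw [this, Multiset.card_cons]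
      push_cast
      ring

-- Summing the truncated count differences over any duplicate-free enumeration of l's
-- values gives the size of the multiset difference.
theorem sum_count_sub_eq_card (S l t : List Int) (hn : S.Nodup)
    (hm : ∀ v, v ∈ S ↔ v ∈ l) :
    (S.map (fun v => l.count v - t.count v)).sum
      = ((l : Multiset Int) - (t : Multiset Int)).card := by
  rw [← List.sum_toFinset _ hn]
  have hS : S.toFinset = ((l : Multiset Int)).toFinset := by
    ext a
    simp [hm a]
  rw [hS, ← Multiset.toFinset_sum_count_eq (((l : Multiset Int)) - (t : Multiset Int))]
  have hsub : (((l : Multiset Int)) - (t : Multiset Int)).toFinset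
      ⊆ ((l : Multiset Int)).toFinset := by
    intro a ha
    simp only [Multiset.mem_toFinset] at ha ⊢
    have hpos := Multiset.count_pos.mpr ha
    rw [Multiset.count_sub] at hpos
    exact Multiset.count_pos.mp (by omega)
  calc ∑ v ∈ ((l : Multiset Int)).toFinset, (l.count v - t.count v)
      = ∑ v ∈ ((l : Multiset Int)).toFinset,
          Multiset.count v ((l : Multiset Int) - (t : Multiset Int)) :=
        Finset.sum_congr rfl (fun a _ => by simp [Multiset.count_sub, List.count_diff])
    _ = ∑ a ∈ (((l : Multiset Int)) - (t : Multiset Int)).toFinset,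
          Multiset.count a ((l : Multiset Int) - (t : Multiset Int)) :=
        (Finset.sum_subset hsub (fun a _ hna =>
          Multiset.count_eq_zero.mpr (fun hmem => hna (Multiset.mem_toFinset.mpr hmem)))).symm

theorem max_zero_sub_cast (a b : Nat) : max 0 ((a : Int) - (b : Int)) = ((a - b : Nat) : Int) := by
  omega

-- B in closed form: the truncated-difference sum over the distinct values of idxs1.
theorem dist_distance_alt_eq (idxs1 idxs2 : List Int) :
    dist_distance_alt idxs1 idxs2
      = (((PySem.Set.ofList idxs1).map
            (fun v => idxs1.count v - idxs2.count v)).sum : Int) := by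
  unfold dist_distance_alt
  simp only [PySem.Dict.foldl_insert_getD_add_one_eq_counter, PySem.Dict.items_counter,
    List.map_map]
  rw [Nat.cast_list_sum, List.map_map]
  apply congrArg List.sum
  apply List.map_congr_left
  intro v _
  simp only [Function.comp_apply, PySem.Dict.getD_counter]
  exact max_zero_sub_cast _ _

-- ===== VERDICT (by name: the statement is the Claim_ definition above) =====
theorem dist_distance_spec : Claim_equal_dist_distance := by
  intro idxs1 idxs2 _
  unfold Spec_dist_distance
  show distLoop idxs1 idxs2 0 = _
  rw [dist_distance_alt_eq,
    sum_count_sub_eq_card (PySem.Set.ofList idxs1) idxs1 idxs2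
      (PySem.Set.nodup_ofList idxs1) (fun v => PySem.Set.mem_ofList idxs1 v),
    distLoop_eq_card_sub]
  ring
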